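-- pv_equiv track=rewrite | github.com/adlaiCarmona/advent-of-code | advent-of-code-2023/day6/advent6.py | get_win_options
-- ===== SOURCE A (Python) =====
-- def get_win_options(race_time, distance_record):
--   win_options = []
--   for time_pressed in range(1, race_time):
--     speed = time_pressed
--     remaining_time = race_time - time_pressed
--     distance = speed * remaining_time
--     if distance > distance_record:
--       win_options.append(time_pressed)
--   return win_options
-- ===== SOURCE B (Python) =====
-- def _isqrt(n):
--     # largest r with r*r <= n, by binary search (n >= 0)
--     if n < 2:
--         return n
--     lo, hi = 1, n
--     while lo + 1 < hi:
--         mid = (lo + hi) // 2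
--         if mid * mid <= n:
--             lo = mid
--         else:
--             hi = mid
--     return lo
--
--
-- def get_win_options(race_time, distance_record):
--     # t*(race_time-t) > distance_record  iff  (2t-race_time)^2 < disc
--     disc = race_time * race_time - 4 * distance_record
--     if disc <= 0:
--         return []
--     s = _isqrt(disc - 1)  # largest s with s*s < disc
--     lo = max((race_time - s + 1) // 2, 1)
--     hi = min((race_time + s) // 2, race_time - 1)
--     return list(range(lo, hi + 1))
-- ===== Notes on version B (the rewrite author's own statement) =====
-- stated objective: faster
-- what changed: Replaces the linear scan over all press times by solving the quadratic t*(T-t) > R exactly with an integer square root and emitting the winning interval as a range directly.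
import Mathlib
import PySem

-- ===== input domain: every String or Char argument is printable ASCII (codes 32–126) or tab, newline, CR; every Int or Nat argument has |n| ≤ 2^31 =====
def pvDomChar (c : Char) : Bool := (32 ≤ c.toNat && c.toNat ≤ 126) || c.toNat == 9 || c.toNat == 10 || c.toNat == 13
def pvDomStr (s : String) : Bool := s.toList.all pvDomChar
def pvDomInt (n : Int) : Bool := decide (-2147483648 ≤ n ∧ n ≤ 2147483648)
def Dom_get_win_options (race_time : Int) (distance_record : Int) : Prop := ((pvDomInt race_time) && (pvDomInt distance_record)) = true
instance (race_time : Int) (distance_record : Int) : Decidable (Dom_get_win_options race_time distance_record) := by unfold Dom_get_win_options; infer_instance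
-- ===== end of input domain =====

-- B replaces A's linear scan by solving the quadratic with an integer square root and emitting the winning interval as a range.

-- ===== PORT A =====
def get_win_options (race_time : Int) (distance_record : Int) : List Int :=
  (PySem.List.pyRange 1 race_time 1).foldl
    (fun win_options time_pressed =>
      let speed := time_pressed
      let remaining_time := race_time - time_pressed
      let distance := speed * remaining_time
      if distance > distance_record then win_options ++ [time_pressed] else win_options)
    []

-- ===== PORT B =====
-- binary-search integer square root (port of Source B's _isqrt loop)
def pyIsqrtAux (n lo hi : Int) : Int :=
  if _h : lo + 1 < hi then
    let mid := PySem.Int.floordiv (lo + hi) 2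
    if mid * mid ≤ n then pyIsqrtAux n mid hi else pyIsqrtAux n lo mid
  else lo
termination_by (hi - lo).toNat
decreasing_by
  all_goals
    have := PySem.Int.floordiv_eq_ediv_of_pos (a := lo + hi) (b := 2) (by omega)
    simp only [this]
    omega

def pyIsqrt (n : Int) : Int :=
  if n < 2 then n else pyIsqrtAux n 1 n

def get_win_options_alt (race_time : Int) (distance_record : Int) : List Int :=
  let disc := race_time * race_time - 4 * distance_record
  if disc ≤ 0 then []
  else
    let s := pyIsqrt (disc - 1)
    let lo := max (PySem.Int.floordiv (race_time - s + 1) 2) 1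
    let hi := min (PySem.Int.floordiv (race_time + s) 2) (race_time - 1)
    PySem.List.pyRange lo (hi + 1) 1

-- ===== PRECONDITION & SPEC =====
def Spec_get_win_options (race_time : Int) (distance_record : Int) (out : List Int) : Prop := out = get_win_options_alt race_time distance_record
instance (race_time : Int) (distance_record : Int) (out : List Int) : Decidable (Spec_get_win_options race_time distance_record out) := by unfold Spec_get_win_options; infer_instance

-- ===== CLAIM (what is proved, stated in full; the proofs are below) =====
def Claim_equal_get_win_options : Prop := ∀ (race_time : Int) (distance_record : Int), Dom_get_win_options race_time distance_record → Spec_get_win_options race_time distance_record (get_win_options race_time distance_record)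

-- ===== LEMMAS AND PROOFS =====

-- correctness of the binary-search integer square root
theorem pyIsqrtAux_spec (n lo hi : Int) (h0 : 0 ≤ lo) (h1 : lo * lo ≤ n)
    (h2 : n < hi * hi) (h3 : lo < hi) :
    0 ≤ pyIsqrtAux n lo hi ∧ pyIsqrtAux n lo hi * pyIsqrtAux n lo hi ≤ n ∧
      n < (pyIsqrtAux n lo hi + 1) * (pyIsqrtAux n lo hi + 1) := by
  fun_induction pyIsqrtAux n lo hi with
  | case1 lo hi h mid hle ih =>
      apply ih <;>
        first
          | assumption
          | (have := PySem.Int.floordiv_eq_ediv_of_pos (a := lo + hi) (b := 2) (by omega : (0:Int) < 2)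
             simp only [mid, this] at *; omega)
  | case2 lo hi h mid hgt ih =>
      apply ih <;>
        first
          | assumption
          | (have := PySem.Int.floordiv_eq_ediv_of_pos (a := lo + hi) (b := 2) (by omega : (0:Int) < 2)
             simp only [mid, this] at *; omega)
  | case3 lo hi h =>
      have : hi = lo + 1 := by omega
      subst this
      exact ⟨h0, h1, h2⟩

theorem pyIsqrt_spec (n : Int) (hn : 0 ≤ n) :
    0 ≤ pyIsqrt n ∧ pyIsqrt n * pyIsqrt n ≤ n ∧ n < (pyIsqrt n + 1) * (pyIsqrt n + 1) := by
  unfold pyIsqrt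
  split
  · constructor
    · omega
    · constructor
      · nlinarith
      · nlinarith
  · exact pyIsqrtAux_spec n 1 n (by omega) (by omega) (by nlinarith) (by omega)

-- a filter of an integer range by an interval condition is a range
theorem filter_pyRange_interval (a b lo hi : Int) (p : Int → Bool)
    (h : ∀ t, a ≤ t → t < b → (p t = true ↔ lo ≤ t ∧ t ≤ hi)) :
    (PySem.List.pyRange a b 1).filter p = PySem.List.pyRange (max lo a) (min (hi + 1) b) 1 := by
  have hmem : ∀ t, t ∈ (PySem.List.pyRange a b 1).filter p ↔
      t ∈ PySem.List.pyRange (max lo a) (min (hi + 1) b) 1 := by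
    intro t
    simp only [List.mem_filter, PySem.List.mem_pyRange_one]
    constructor
    · rintro ⟨⟨h1, h2⟩, hp⟩
      have := (h t h1 h2).mp hp
      omega
    · rintro ⟨h1, h2⟩
      refine ⟨⟨by omega, by omega⟩, (h t (by omega) (by omega)).mpr (by omega)⟩
  have hs1 : (PySem.List.pyRange a b 1).Pairwise (· < ·) := PySem.List.pairwise_lt_pyRange_one a b
  have hsf : ((PySem.List.pyRange a b 1).filter p).Pairwise ((· < ·) : Int → Int → Prop) :=
    hs1.filter p
  have hs2 : (PySem.List.pyRange (max lo a) (min (hi + 1) b) 1).Pairwise ((· < ·) : Int → Int → Prop) :=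
    PySem.List.pairwise_lt_pyRange_one _ _
  have hn1 : ((PySem.List.pyRange a b 1).filter p).Nodup := hsf.imp (fun hab => ne_of_lt hab)
  have hn2 : (PySem.List.pyRange (max lo a) (min (hi + 1) b) 1).Nodup :=
    hs2.imp (fun hab => ne_of_lt hab)
  have hperm := (List.perm_ext_iff_of_nodup hn1 hn2).mpr hmem
  exact List.Perm.eq_of_pairwise' (hsf.imp le_of_lt) (hs2.imp le_of_lt) hperm

-- A is the filter form of the same range
theorem get_win_options_eq_filter (T R : Int) :
    get_win_options T R =
      (PySem.List.pyRange 1 T 1).filter (fun t => decide (R < t * (T - t))) := by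
  unfold get_win_options
  rw [PySem.List.foldl_append_ite_eq_filter]
  simp [gt_iff_lt]

-- ===== VERDICT (by name: the statement is the Claim_ definition above) =====
theorem get_win_options_spec : Claim_equal_get_win_options := by
  intro T R _
  unfold Spec_get_win_options get_win_options_alt
  rw [get_win_options_eq_filter]
  set D : Int := T * T - 4 * R with hD
  by_cases hd : D ≤ 0
  · simp only [hd, if_true]
    rw [List.filter_eq_nil_iff]
    intro t _
    simp only [decide_eq_true_eq]
    intro hwin
    nlinarith [sq_nonneg (2 * t - T)]
  · simp only [hd, if_false]
    obtain ⟨hs0, hs1, hs2⟩ := pyIsqrt_spec (D - 1) (by omega)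
    set s : Int := pyIsqrt (D - 1) with hsdef
    have e1 := PySem.Int.floordiv_eq_ediv_of_pos (a := T - s + 1) (b := 2) (by omega : (0:Int) < 2)
    have e2 := PySem.Int.floordiv_eq_ediv_of_pos (a := T + s) (b := 2) (by omega : (0:Int) < 2)
    rw [filter_pyRange_interval 1 T ((T - s + 1) / 2) ((T + s) / 2)
        (fun t => decide (R < t * (T - t)))
        (by
          intro t _ _
          simp only [decide_eq_true_eq]
          constructor
          · intro hwin
            have hsq : (2 * t - T) * (2 * t - T) ≤ D - 1 := by nlinarith
            have habs : -s ≤ 2 * t - T ∧ 2 * t - T ≤ s := by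
              constructor
              · by_contra hc
                rw [Int.not_le] at hc
                nlinarith
              · by_contra hc
                rw [Int.not_le] at hc
                nlinarith
            omega
          · intro ht
            have habs : -s ≤ 2 * t - T ∧ 2 * t - T ≤ s := by omega
            have hsq : (2 * t - T) * (2 * t - T) ≤ s * s := by nlinarith
            nlinarith)]
    rw [e1, e2]
    congr 1
    omega
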